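-- pv_equiv track=rewrite | github.com/KIM3310/the-logistics-prophet | src/control_tower/service_store.py | normalize_status_input
-- ===== SOURCE A (Python) =====
-- STATUS_ORDER = ["New", "Investigating", "Mitigating", "Resolved", "Dismissed"]
--
-- QUEUE_STATUSES = set(STATUS_ORDER)
--
-- STATUS_ALIASES = {
--     "new": "New",
--     "start": "New",
--     "investigating": "Investigating",
--     "investigate": "Investigating",
--     "check": "Investigating",
--     "mitigating": "Mitigating",
--     "mitigate": "Mitigating",
--     "fix": "Mitigating",
--     "resolved": "Resolved",
--     "resolve": "Resolved",
--     "done": "Resolved",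
--     "closed": "Resolved",
--     "close": "Resolved",
--     "dismissed": "Dismissed",
--     "dismiss": "Dismissed",
--     "skip": "Dismissed",
-- }
--
-- def normalize_status_input(status: str) -> str:
--     raw = str(status or "").strip()
--     if not raw:
--         raise ValueError("status is required")
--
--     if raw in QUEUE_STATUSES:
--         return raw
--
--     canonical_by_lower = {item.casefold(): item for item in STATUS_ORDER}
--     lowered = raw.casefold()
--     if lowered in canonical_by_lower:
--         return canonical_by_lower[lowered]
--
--     alias = STATUS_ALIASES.get(lowered)
--     if alias:
--         return alias
--
--     supported = ", ".join(STATUS_ORDER + ["Start", "Check", "Fix", "Done", "Skip"])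
--     raise ValueError(f"invalid status: {raw}. supported values: {supported}")
-- ===== SOURCE B (Python) =====
-- STATUS_ORDER = ["New", "Investigating", "Mitigating", "Resolved", "Dismissed"]
--
-- # Each canonical status with every lowered spelling that maps to it (its own
-- # casefold plus the aliases); the function scans these groups in order.
-- STATUS_GROUPS = [
--     ("New", ["new", "start"]),
--     ("Investigating", ["investigating", "investigate", "check"]),
--     ("Mitigating", ["mitigating", "mitigate", "fix"]),
--     ("Resolved", ["resolved", "resolve", "done", "closed", "close"]),
--     ("Dismissed", ["dismissed", "dismiss", "skip"]),
-- ]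
--
-- def normalize_status_input(status: str) -> str:
--     raw = str(status or "").strip()
--     if not raw:
--         raise ValueError("status is required")
--     lowered = raw.casefold()
--     for canonical, spellings in STATUS_GROUPS:
--         if lowered in spellings:
--             return canonical
--     supported = ", ".join(STATUS_ORDER + ["Start", "Check", "Fix", "Done", "Skip"])
--     raise ValueError(f"invalid status: {raw}. supported values: {supported}")
-- ===== Notes on version B (the rewrite author's own statement) =====
-- stated objective: alternative
-- what changed: Replaces A's three staged lookups (exact membership in the canonical set, a casefold map rebuilt on every call, then an alias-dict lookup) by a single linear scan over canonical-status groups, each listing every lowered spelling of its status.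
import Mathlib
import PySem

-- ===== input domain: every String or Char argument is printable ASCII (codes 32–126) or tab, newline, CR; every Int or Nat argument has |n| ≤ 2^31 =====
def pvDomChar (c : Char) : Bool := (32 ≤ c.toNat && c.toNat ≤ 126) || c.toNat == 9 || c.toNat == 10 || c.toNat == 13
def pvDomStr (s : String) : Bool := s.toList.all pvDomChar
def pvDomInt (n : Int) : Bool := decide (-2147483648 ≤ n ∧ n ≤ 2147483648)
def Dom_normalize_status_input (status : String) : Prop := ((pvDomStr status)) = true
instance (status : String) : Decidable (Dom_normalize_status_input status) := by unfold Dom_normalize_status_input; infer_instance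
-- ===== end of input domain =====

-- B replaces A's three staged lookups by one linear scan over canonical-status groups (objective: alternative).


-- ===== PORT A =====
def pvStatusOrder : List String := ["New", "Investigating", "Mitigating", "Resolved", "Dismissed"]

def pvQueueStatuses : PySem.Set String := PySem.Set.ofList pvStatusOrder

def pvStatusAliases : PySem.Dict String String := PySem.Dict.ofList
  [("new", "New"), ("start", "New"),
   ("investigating", "Investigating"), ("investigate", "Investigating"), ("check", "Investigating"),
   ("mitigating", "Mitigating"), ("mitigate", "Mitigating"), ("fix", "Mitigating"),
   ("resolved", "Resolved"), ("resolve", "Resolved"), ("done", "Resolved"),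
   ("closed", "Resolved"), ("close", "Resolved"),
   ("dismissed", "Dismissed"), ("dismiss", "Dismissed"), ("skip", "Dismissed")]

-- the part of A after the queue-membership check, a function of `lowered`
-- (in the final `raise` branches the port returns "": those inputs are outside Pre_)
def pvAtail (lowered : String) : String :=
  let canonical_by_lower : PySem.Dict String String :=
    pvStatusOrder.foldl (fun d item => d.insert (PySem.Str.lower item) item) PySem.Dict.empty
  match canonical_by_lower.get? lowered with
  | some v => v
  | none =>
    match pvStatusAliases.get? lowered with
    | some al => if al == "" then "" else al            -- `if alias:` truthiness
    | none => ""                                        -- raise ValueError (outside Pre_)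

def normalize_status_input (status : String) : String :=
  let raw := PySem.Str.strip (if status == "" then "" else status)  -- str(status or "").strip()
  if raw == "" then ""                                              -- raise ValueError (outside Pre_)
  else if PySem.Set.contains pvQueueStatuses raw then raw
  else pvAtail (PySem.Str.lower raw)

-- ===== PORT B =====
def pvStatusGroups : List (String × List String) :=
  [("New", ["new", "start"]),
   ("Investigating", ["investigating", "investigate", "check"]),
   ("Mitigating", ["mitigating", "mitigate", "fix"]),
   ("Resolved", ["resolved", "resolve", "done", "closed", "close"]),
   ("Dismissed", ["dismissed", "dismiss", "skip"])]

-- the `for canonical, spellings in STATUS_GROUPS` loop of Source B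
def pvGroupScan : List (String × List String) → String → String
  | [], _ => ""                                         -- fell through: raise ValueError (outside Pre_)
  | (canonical, spellings) :: rest, lowered =>
      if lowered ∈ spellings then canonical else pvGroupScan rest lowered

def normalize_status_input_alt (status : String) : String :=
  let raw := PySem.Str.strip (if status == "" then "" else status)
  if raw == "" then ""                                              -- raise ValueError (outside Pre_)
  else pvGroupScan pvStatusGroups (PySem.Str.lower raw)

-- ===== PRECONDITION & SPEC =====
-- Pre_ holds exactly where A returns normally: the stripped, casefolded input is one of the
-- recognised names/aliases; everywhere else A raises ValueError.
def Pre_normalize_status_input (status : String) : Prop :=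
  PySem.Str.lower (PySem.Str.strip status) ∈
    ["new", "start", "investigating", "investigate", "check", "mitigating", "mitigate", "fix",
     "resolved", "resolve", "done", "closed", "close", "dismissed", "dismiss", "skip"]
instance (status : String) : Decidable (Pre_normalize_status_input status) := by
  unfold Pre_normalize_status_input; infer_instance

def pvWitness_normalize_status_input : String := " Start "

def Spec_normalize_status_input (status : String) (out : String) : Prop := out = normalize_status_input_alt status
instance (status : String) (out : String) : Decidable (Spec_normalize_status_input status out) := by unfold Spec_normalize_status_input; infer_instance

-- ===== CLAIM (what is proved, stated in full; the proofs are below) =====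
def Claim_equal_normalize_status_input : Prop := ∀ (status : String), Dom_normalize_status_input status → Pre_normalize_status_input status → Spec_normalize_status_input status (normalize_status_input status)

-- ===== LEMMAS AND PROOFS =====

theorem normalize_status_input_spec : Claim_equal_normalize_status_input := by
  intro status _ hpre
  unfold Spec_normalize_status_input normalize_status_input normalize_status_input_alt
  have hor : (if status == "" then "" else status) = status := by
    by_cases h : status = "" <;> simp [h]
  rw [hor]
  have hne : (PySem.Str.strip status == "") = false := by
    rw [beq_eq_false_iff_ne]
    intro hb
    unfold Pre_normalize_status_input at hpre
    rw [hb] at hpre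
    exact absurd hpre (by decide)
  by_cases hq : PySem.Set.contains pvQueueStatuses (PySem.Str.strip status) = true
  · -- the stripped input is one of the five canonical literals
    have hmem : PySem.Str.strip status ∈ pvStatusOrder := by
      simpa [pvQueueStatuses, PySem.Set.contains] using hq
    simp only [pvStatusOrder, List.mem_cons, List.not_mem_nil, or_false] at hmem
    rcases hmem with h | h | h | h | h <;> rw [h] <;> decide
  · -- otherwise both sides are the same function of the casefolded form, one of the 16 keys
    have hq2 : PySem.Str.strip status ∉ pvQueueStatuses := by simpa using hq
    unfold Pre_normalize_status_input at hpre
    simp only [List.mem_cons, List.not_mem_nil, or_false] at hpre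
    rcases hpre with h | h | h | h | h | h | h | h | h | h | h | h | h | h | h | h <;>
      simp [hne, hq2, h] <;> decide
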